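-- pv_equiv track=rewrite | github.com/JasonXJ/algorithms | leetcode/lc221.py | analyzeStack
-- ===== SOURCE A (Python) =====
-- def analyzeStack(stack, start=0):
--     total_width = remain_width = sum(x[1] for x in stack[start:])
--     max_square = 0
--     for height, width in stack[start:]:
--         current_square = min(height, remain_width)
--         if current_square > max_square:
--             max_square = current_square
--         remain_width -= width
--
--     return total_width, max_square
-- ===== SOURCE B (Python) =====
-- def analyzeStack(stack, start=0):
--     items = stack[start:]
--     n = len(items)
--     suffix = [0] * (n + 1)          # suffix[i] = total width of items[i:]
--     for i in range(n - 1, -1, -1):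
--         suffix[i] = items[i][1] + suffix[i + 1]
--     mins = [min(h, s) for (h, _), s in zip(items, suffix)]
--     return suffix[0], max([0] + mins)
-- ===== Notes on version B (the rewrite author's own statement) =====
-- stated objective: alternative
-- what changed: Replaces the in-loop running subtraction and running max-if with a precomputed suffix-width table built back-to-front, a list of min(height, suffix-width) values, and one max pass seeded with 0.
import Mathlib
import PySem

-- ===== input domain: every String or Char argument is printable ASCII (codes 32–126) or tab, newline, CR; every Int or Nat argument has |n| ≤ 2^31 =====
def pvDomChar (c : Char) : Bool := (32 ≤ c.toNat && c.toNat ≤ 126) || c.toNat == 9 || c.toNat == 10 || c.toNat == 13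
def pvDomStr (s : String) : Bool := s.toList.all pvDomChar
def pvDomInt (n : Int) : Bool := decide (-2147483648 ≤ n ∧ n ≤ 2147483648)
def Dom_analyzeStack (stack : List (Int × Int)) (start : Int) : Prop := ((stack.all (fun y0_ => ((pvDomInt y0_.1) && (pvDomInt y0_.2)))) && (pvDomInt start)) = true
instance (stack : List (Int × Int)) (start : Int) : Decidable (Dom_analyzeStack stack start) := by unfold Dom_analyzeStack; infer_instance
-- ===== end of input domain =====

-- B builds an explicit suffix-width table back-to-front and takes one max pass,
-- instead of A's single loop with a running subtraction and running max (objective: alternative).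

-- ===== PORT A =====
-- A: total = sum of widths of stack[start:]; one loop carrying (max_square, remain_width).
def analyzeStack (stack : List (Int × Int)) (start : Int) : Int × Int :=
  let items := PySem.List.slice stack (some start) none
  let total := items.foldl (fun a x => a + x.2) 0
  let res := items.foldl (fun (st : Int × Int) hw =>
      let cur := min hw.1 st.2
      let m := if cur > st.1 then cur else st.1
      (m, st.2 - hw.2)) ((0 : Int), total)
  (total, res.1)

-- ===== PORT B =====
-- suffix-width table of a width list, built back-to-front (length = n+1, last entry 0)
def pvSuffix : List Int → List Int
  | [] => [0]
  | w :: ws => (w + (pvSuffix ws).headI) :: pvSuffix ws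

def analyzeStack_alt (stack : List (Int × Int)) (start : Int) : Int × Int :=
  let items := PySem.List.slice stack (some start) none
  let suffix := pvSuffix (items.map Prod.snd)
  let mins := (items.zip suffix).map (fun p => min p.1.1 p.2)
  (suffix.headI, mins.foldl max 0)

-- ===== PRECONDITION & SPEC =====
def Spec_analyzeStack (stack : List (Int × Int)) (start : Int) (out : Int × Int) : Prop := out = analyzeStack_alt stack start
instance (stack : List (Int × Int)) (start : Int) (out : Int × Int) : Decidable (Spec_analyzeStack stack start out) := by unfold Spec_analyzeStack; infer_instance

-- ===== CLAIM (what is proved, stated in full; the proofs are below) =====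
def Claim_equal_analyzeStack : Prop := ∀ (stack : List (Int × Int)) (start : Int), Dom_analyzeStack stack start → Spec_analyzeStack stack start (analyzeStack stack start)

-- ===== LEMMAS AND PROOFS =====
lemma pvSuffix_headI (ws : List Int) : (pvSuffix ws).headI = ws.sum := by
  induction ws with
  | nil => simp [pvSuffix]
  | cons w ws ih => simp [pvSuffix, ih]

lemma foldl_add_snd (l : List (Int × Int)) (a : Int) :
    l.foldl (fun a x => a + x.2) a = a + (l.map Prod.snd).sum := by
  induction l generalizing a with
  | nil => simp
  | cons h t ih => simp [List.foldl, ih]; ring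

lemma loop_eq (l : List (Int × Int)) (m : Int) :
    (l.foldl (fun (st : Int × Int) hw =>
      let cur := min hw.1 st.2
      let m := if cur > st.1 then cur else st.1
      (m, st.2 - hw.2)) (m, (l.map Prod.snd).sum)).1
    = ((l.zip (pvSuffix (l.map Prod.snd))).map (fun p => min p.1.1 p.2)).foldl max m := by
  induction l generalizing m with
  | nil => simp
  | cons h t ih =>
    simp only [List.map_cons, List.sum_cons, pvSuffix, List.zip_cons_cons, List.map_cons,
      List.foldl_cons, pvSuffix_headI]
    have e2 : h.2 + (t.map Prod.snd).sum - h.2 = (t.map Prod.snd).sum := by ring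
    have e3 : (if min h.1 (h.2 + (t.map Prod.snd).sum) > m then min h.1 (h.2 + (t.map Prod.snd).sum) else m)
        = max m (min h.1 (h.2 + (t.map Prod.snd).sum)) := by split_ifs <;> omega
    simp only [e2, e3]
    exact ih _

-- ===== VERDICT (by name: the statement is the Claim_ definition above) =====
theorem analyzeStack_spec : Claim_equal_analyzeStack := by
  intro stack start _
  unfold Spec_analyzeStack analyzeStack analyzeStack_alt
  set items := PySem.List.slice stack (some start) none with hi
  have ht : items.foldl (fun a x => a + x.2) 0 = (items.map Prod.snd).sum := by
    simpa using foldl_add_snd items 0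
  simp only [ht, pvSuffix_headI]
  exact congrArg _ (loop_eq items 0)
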